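-- pv_equiv track=rewrite | github.com/TDCIAN/AlgorithmPractice | python_basic/4.19 ~ 4.25/basic_search.py | ascending
-- ===== SOURCE A (Python) =====
-- result = 0
--
-- def ascending(array):
--     now = array[0]
--     result = 1
--     for i in range(1, len(array)):
--         if now < array[i]:
--             result += 1
--             now = array[i]
--     return result
--
-- array = []
-- ===== SOURCE B (Python) =====
-- def ascending(array):
--     # prefix-maximum table, then count the strict increases in it
--     runmax = []
--     m = None
--     for x in array:
--         m = x if m is None else max(m, x)
--         runmax.append(m)
--     return 1 + sum(b > a for a, b in zip(runmax, runmax[1:]))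
-- ===== Notes on version B (the rewrite author's own statement) =====
-- stated objective: alternative
-- what changed: B builds the prefix-maximum table in one pass and then counts the strict increases between adjacent entries of that table (1 + count), instead of A's single loop threading a running 'now' and incrementing a counter in place.
-- outside the precondition, e.g. on ascending([]): A raises IndexError, B returns 1
import Mathlib
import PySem

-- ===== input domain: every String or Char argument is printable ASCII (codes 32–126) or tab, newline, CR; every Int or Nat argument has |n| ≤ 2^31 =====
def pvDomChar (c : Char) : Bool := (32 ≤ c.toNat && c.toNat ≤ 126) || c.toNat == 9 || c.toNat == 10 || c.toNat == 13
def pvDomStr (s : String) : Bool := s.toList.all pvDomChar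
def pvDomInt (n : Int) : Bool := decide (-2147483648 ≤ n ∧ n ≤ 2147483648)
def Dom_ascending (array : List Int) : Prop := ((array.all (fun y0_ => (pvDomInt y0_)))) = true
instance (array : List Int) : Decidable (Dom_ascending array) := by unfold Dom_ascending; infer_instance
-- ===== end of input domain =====

-- B differs from A in structure only: it tabulates prefix maxima, then counts adjacent strict increases.
-- Equivalence of return values on non-empty lists (A raises IndexError on []).

-- ===== PORT A =====
def ascending (array : List Int) : Int :=
  let now := PySem.List.pyGetD array 0 0    -- array[0]; IndexError on [] is excluded by Pre_
  let st := (PySem.List.pyRange 1 (array.length : Int) 1).foldl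
    (fun (acc : Int × Int) i =>
      let x := PySem.List.pyGetD array i 0
      if acc.2 < x then (acc.1 + 1, x) else acc)
    (1, now)
  st.1

-- ===== PORT B =====
def ascending_alt (array : List Int) : Int :=
  let st := array.foldl
    (fun (acc : List Int × Option Int) x =>
      let m := match acc.2 with
               | none => x
               | some m0 => max m0 x
      (acc.1 ++ [m], some m))
    ([], none)
  let runmax := st.1
  1 + ((runmax.zip (PySem.List.slice runmax (some 1) none)).map
        (fun p => if p.1 < p.2 then (1 : Int) else 0)).sum

-- ===== PRECONDITION & SPEC =====
-- Pre_ excludes the empty list, on which A raises IndexError (array[0]).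
def Pre_ascending (array : List Int) : Prop := array ≠ []
instance (array : List Int) : Decidable (Pre_ascending array) := by unfold Pre_ascending; infer_instance
def pvWitness_ascending : List Int := ([3, 1, 4])

def Spec_ascending (array : List Int) (out : Int) : Prop := out = ascending_alt array
instance (array : List Int) (out : Int) : Decidable (Spec_ascending array out) := by unfold Spec_ascending; infer_instance

-- ===== CLAIM (what is proved, stated in full; the proofs are below) =====
def Claim_equal_ascending : Prop := ∀ (array : List Int), Dom_ascending array → Pre_ascending array → Spec_ascending array (ascending array)

-- ===== LEMMAS AND PROOFS =====

/-- The intended value as a simple recursion: number of strict increases of the running max. -/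
def incCount (m : Int) : List Int → Int
  | [] => 0
  | x :: rest => (if m < x then 1 else 0) + incCount (max m x) rest

/-- Prefix-max scan starting from current max `m`. -/
def scanMax (m : Int) : List Int → List Int
  | [] => []
  | x :: rest => max m x :: scanMax (max m x) rest

theorem ascending_fold (rest : List Int) : ∀ (r m : Int),
    (rest.foldl (fun (acc : Int × Int) x => if acc.2 < x then (acc.1 + 1, x) else acc) (r, m)).1
      = r + incCount m rest := by
  induction rest with
  | nil => intro r m; simp [incCount]
  | cons x rest ih =>
    intro r m
    simp only [List.foldl_cons, incCount]
    by_cases h : m < x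
    · have hmx : max m x = x := by omega
      simp [h, hmx, ih]; ring
    · have hmx : max m x = m := by omega
      simp [h, hmx, ih]

theorem alt_fold (xs : List Int) : ∀ (pref : List Int) (m : Int),
    (xs.foldl (fun (acc : List Int × Option Int) x =>
        let m := match acc.2 with
                 | none => x
                 | some m0 => max m0 x
        (acc.1 ++ [m], some m)) (pref, some m))
      = (pref ++ scanMax m xs, some (xs.foldl max m)) := by
  induction xs with
  | nil => intro pref m; simp [scanMax]
  | cons x xs ih =>
    intro pref m
    simp only [List.foldl_cons, scanMax]
    rw [ih]
    simp

theorem zip_count (xs : List Int) : ∀ (m : Int),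
    (((m :: scanMax m xs).zip (scanMax m xs)).map
        (fun p : Int × Int => if p.1 < p.2 then (1 : Int) else 0)).sum
      = incCount m xs := by
  induction xs with
  | nil => intro m; simp [scanMax, incCount]
  | cons x xs ih =>
    intro m
    simp only [scanMax, incCount, List.zip_cons_cons, List.map_cons, List.sum_cons, ih]
    by_cases h : m < x
    · have hmx : max m x = x := by omega
      simp [hmx, h]
    · have hmx : max m x = m := by omega
      simp [hmx, h]

-- ===== VERDICT (by name: the statement is the Claim_ definition above) =====
theorem ascending_spec : Claim_equal_ascending := by
  intro array _ hpre
  unfold Spec_ascending ascending ascending_alt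
  cases array with
  | nil => exact absurd rfl hpre
  | cons x rest =>
    have hx0 : PySem.List.pyGetD (x :: rest) 0 0 = x := by
      simp [PySem.List.pyGetD_ofNat']
    -- A side: turn the index loop into a structural fold over `rest`
    have hA := PySem.List.foldl_pyRange_pyGetD' (xs := x :: rest) (a := 1) (d := 0)
      (f := fun (acc : Int × Int) v => if acc.2 < v then (acc.1 + 1, v) else acc)
      (init := ((1 : Int), x)) (by norm_num)
    -- B side: the appending fold builds the prefix-max table
    have hB := alt_fold rest [x] x
    simp only [hx0, hA, Int.toNat_one, List.drop_succ_cons, List.drop_zero,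
      List.foldl_cons, List.nil_append] at *
    have hs : PySem.List.slice (x :: scanMax x rest) (some 1) none = scanMax x rest := by
      have h1 := PySem.List.slice_from_natCast (xs := x :: scanMax x rest) (a := 1)
      simpa using h1
    rw [hB, ascending_fold]
    simp only [List.singleton_append, hs]
    rw [zip_count]
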